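-- pv_equiv track=rewrite | github.com/marcosd4h/DeepExtractRuntime | skills/map-attack-surface/scripts/_common.py | compute_reachability
-- ===== SOURCE A (Python) =====
-- from collections import defaultdict, deque
--
-- def compute_reachability(
--     adjacency: dict[str, list[dict]],
--     start_func: str,
--     max_depth: int = 10,
-- ) -> dict[str, int]:
--     """BFS from start_func, return dict of reachable_name -> depth.
--
--     Only follows internal functions (function_id is not None).
--
--     Note: Kept for backward compatibility.  New code should use
--     ``CallGraph.reachable_from_internal_only()`` directly.
--     """
--     visited: dict[str, int] = {}
--     queue: deque[tuple[str, int]] = deque()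
--     queue.append((start_func, 0))
--     visited[start_func] = 0
--
--     while queue:
--         current, depth = queue.popleft()
--         if depth >= max_depth:
--             continue
--         for xref in adjacency.get(current, []):
--             callee = xref.get("function_name", "")
--             if not callee or callee in visited:
--                 continue
--             fid = xref.get("function_id")
--             if fid is not None and callee in adjacency:
--                 visited[callee] = depth + 1
--                 queue.append((callee, depth + 1))
--     return visited
-- ===== SOURCE B (Python) =====
-- def compute_reachability(
--     adjacency: dict[str, list[dict]],
--     start_func: str,
--     max_depth: int = 10,
-- ) -> dict[str, int]:
--     """Two-phase rewrite: first strip every per-edge guard in one preprocessing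
--     pass that turns the raw xref dicts into a plain successor-name graph, then
--     run a recursive layer expansion over that cleaned graph."""
--     # Pass 1: cleaned graph node -> list of valid internal callee names
--     succs = {
--         node: [
--             x.get("function_name", "")
--             for x in xrefs
--             if x.get("function_name", "")
--             and x.get("function_id") is not None
--             and x.get("function_name", "") in adjacency
--         ]
--         for node, xrefs in adjacency.items()
--     }
--
--     # Pass 2: recursive expansion, one call per depth layer
--     def expand(visited: dict[str, int], frontier: list[str], depth: int) -> dict[str, int]:
--         if not frontier or depth >= max_depth:
--             return visited
--         layer: list[str] = []
--         for node in frontier: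
--             for callee in succs.get(node, []):
--                 if callee not in visited:
--                     visited[callee] = depth + 1
--                     layer.append(callee)
--         return expand(visited, layer, depth + 1)
--
--     return expand({start_func: 0}, [start_func], 0)
-- ===== Notes on version B (the rewrite author's own statement) =====
-- stated objective: alternative
-- what changed: Replaces A's single-pass deque BFS carrying (node, depth) tuples and re-checking the three edge guards inside the traversal by a two-phase program: a preprocessing pass compiles the raw xref dicts into a plain name->callee-names graph (all per-edge guards evaluated once, up front), and a recursive layer-expansion function then walks that cleaned graph with only the visited check.
import Mathlib
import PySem

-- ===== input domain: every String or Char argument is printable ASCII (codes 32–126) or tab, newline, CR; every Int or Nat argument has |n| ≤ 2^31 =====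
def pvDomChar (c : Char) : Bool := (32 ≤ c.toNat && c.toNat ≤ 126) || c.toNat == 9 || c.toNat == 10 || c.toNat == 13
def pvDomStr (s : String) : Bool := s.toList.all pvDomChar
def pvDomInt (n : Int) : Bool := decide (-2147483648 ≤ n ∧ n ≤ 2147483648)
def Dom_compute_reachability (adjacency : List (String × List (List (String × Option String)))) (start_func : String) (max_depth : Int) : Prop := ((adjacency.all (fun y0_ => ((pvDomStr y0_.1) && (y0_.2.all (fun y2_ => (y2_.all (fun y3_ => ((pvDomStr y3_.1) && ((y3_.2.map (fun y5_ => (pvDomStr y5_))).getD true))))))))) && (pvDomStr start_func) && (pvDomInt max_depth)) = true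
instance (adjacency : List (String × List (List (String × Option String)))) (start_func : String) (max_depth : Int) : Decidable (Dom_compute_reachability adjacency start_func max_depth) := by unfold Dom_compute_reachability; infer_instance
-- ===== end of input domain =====

-- B replaces A's deque BFS with inline per-edge guards by a two-phase program: a preprocessing
-- pass compiles the xref dicts into a plain name->callee-names graph, then a recursive
-- layer-expansion walks the cleaned graph; same asymptotic cost ("alternative").

-- ===== PORT A =====

-- A's loop body for ONE xref dict: A keeps a queue of (name, depth) pairs, so its step
-- appends (callee, depth+1) and re-evaluates every guard on the spot.
def pvStepA (adj : PySem.Dict String (List (List (String × Option String)))) (d : Int)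
    (s : PySem.Dict String Int × List (String × Int)) (xr : List (String × Option String)) :
    PySem.Dict String Int × List (String × Int) :=
  let xd := PySem.Dict.ofList xr
  match xd.getD "function_name" (some "") with
  | none => s                                     -- callee is None: falsy, continue
  | some c =>
    if c = "" ∨ s.1.contains c then s             -- not callee or callee in visited
    else if (xd.getD "function_id" none).isSome ∧ adj.contains c then
      (s.1.insert c (d + 1), s.2 ++ [(c, d + 1)])
    else s

-- termination measure for A's while-queue loop (each accepted push newly visits an adjacency key)
def pvMeasure (adj : PySem.Dict String (List (List (String × Option String))))
    (v : PySem.Dict String Int) (q : List (String × Int)) : Nat :=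
  2 * ((adj.keys.filter (fun k => !(v.contains k))).length) + q.length

theorem pvStepA_measure (adj : PySem.Dict String (List (List (String × Option String)))) (d : Int)
    (s : PySem.Dict String Int × List (String × Int)) (xr : List (String × Option String)) :
    pvMeasure adj (pvStepA adj d s xr).1 (pvStepA adj d s xr).2 ≤ pvMeasure adj s.1 s.2 := by
  unfold pvStepA
  cases h : (PySem.Dict.ofList xr).getD "function_name" (some "") with
  | none => simp [h]
  | some c =>
    simp only [h]
    split_ifs with h1 h2
    · exact le_refl _
    · -- insert branch: c newly visited and c is an adjacency key
      rw [not_or] at h1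
      have hc : adj.contains c = true := h2.2
      have hv : s.1.contains c = false := by
        cases hcv : s.1.contains c with
        | false => rfl
        | true => exact absurd hcv (by simpa using h1.2)
      have hmem : c ∈ adj.keys.filter (fun k => !(s.1.contains k)) := by
        rw [List.mem_filter]
        exact ⟨(PySem.Dict.contains_iff_mem_keys adj c).mp hc, by simp [hv]⟩
      have hlt :
          ((adj.keys.filter (fun k => !((s.1.insert c (d+1)).contains k))).length)
            < ((adj.keys.filter (fun k => !(s.1.contains k))).length) := by
        have : adj.keys.filter (fun k => !((s.1.insert c (d+1)).contains k))
            = (adj.keys.filter (fun k => !(s.1.contains k))).filter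
                (fun k => !((s.1.insert c (d+1)).contains k)) := by
          rw [List.filter_filter]
          apply List.filter_congr
          intro k _
          simp only [PySem.Dict.contains_insert, Bool.not_or]
          cases hk : s.1.contains k <;> simp
        rw [this]
        apply List.length_filter_lt_length_iff_exists.mpr
        exact ⟨c, hmem, by simp [PySem.Dict.contains_insert_self]⟩
      simp only [pvMeasure, List.length_append, List.length_cons, List.length_nil]
      omega
    · exact le_refl _

theorem pvFoldA_measure (adj : PySem.Dict String (List (List (String × Option String)))) (d : Int)
    (xrs : List (List (String × Option String))) :
    ∀ s : PySem.Dict String Int × List (String × Int),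
      pvMeasure adj (xrs.foldl (pvStepA adj d) s).1 (xrs.foldl (pvStepA adj d) s).2
        ≤ pvMeasure adj s.1 s.2 := by
  induction xrs with
  | nil => intro s; exact le_refl _
  | cons xr xrs ih =>
    intro s
    simp only [List.foldl_cons]
    exact le_trans (ih (pvStepA adj d s xr)) (pvStepA_measure adj d s xr)

-- A's while-queue loop, transliterated (pop left; skip at depth ≥ max_depth; push callees)
def pvLoopA (adj : PySem.Dict String (List (List (String × Option String)))) (md : Int)
    (v : PySem.Dict String Int) (q : List (String × Int)) : PySem.Dict String Int :=
  match q with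
  | [] => v
  | (cur, dep) :: rest =>
    if md ≤ dep then pvLoopA adj md v rest
    else
      let s := (adj.getD cur []).foldl (pvStepA adj dep) (v, rest)
      pvLoopA adj md s.1 s.2
termination_by pvMeasure adj v q
decreasing_by
  · simp [pvMeasure]
  · calc pvMeasure adj s.1 s.2 ≤ pvMeasure adj v rest := pvFoldA_measure adj dep _ (v, rest)
      _ < pvMeasure adj v ((cur, dep) :: rest) := by simp [pvMeasure]

def compute_reachability (adjacency : List (String × List (List (String × Option String)))) (start_func : String) (max_depth : Int) : List (String × Int) :=
  let adj := PySem.Dict.ofList adjacency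
  let visited : PySem.Dict String Int := (PySem.Dict.empty).insert start_func 0
  (pvLoopA adj max_depth visited [(start_func, 0)]).items

-- ===== PORT B =====

-- x.get("function_name", "") of one xref dict
def pvName (xr : List (String × Option String)) : Option String :=
  (PySem.Dict.ofList xr).getD "function_name" (some "")

-- the comprehension's filter: name truthy AND function_id is not None AND name in adjacency
def pvKeep (adj : PySem.Dict String (List (List (String × Option String))))
    (xr : List (String × Option String)) : Bool :=
  match pvName xr with
  | none => false
  | some c =>
    c ≠ "" && ((PySem.Dict.ofList xr).getD "function_id" none).isSome && adj.contains c

-- the inner list comprehension: valid internal callee names of one node, in xref order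
def pvClean (adj : PySem.Dict String (List (List (String × Option String))))
    (xrs : List (List (String × Option String))) : List String :=
  (xrs.filter (pvKeep adj)).map (fun xr => (pvName xr).getD "")

-- Pass 1: the dict comprehension building the cleaned graph
def pvSuccs (adjacency : List (String × List (List (String × Option String)))) :
    PySem.Dict String (List String) :=
  let adj := PySem.Dict.ofList adjacency
  adj.items.foldl (fun d p => d.insert p.1 (pvClean adj p.2)) PySem.Dict.empty

-- body of `if callee not in visited: visited[callee] = depth + 1; layer.append(callee)`
def pvVisit (d : Int) (s : PySem.Dict String Int × List String) (c : String) :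
    PySem.Dict String Int × List String :=
  if s.1.contains c then s else (s.1.insert c (d + 1), s.2 ++ [c])

-- Pass 2: B's recursive `expand(visited, frontier, depth)`
def pvExpand (succs : PySem.Dict String (List String)) (md : Int)
    (v : PySem.Dict String Int) (frontier : List String) (d : Int) : PySem.Dict String Int :=
  if frontier = [] ∨ md ≤ d then v
  else
    let s := frontier.foldl (fun s u => (succs.getD u []).foldl (pvVisit d) s) (v, ([] : List String))
    pvExpand succs md s.1 s.2 (d + 1)
termination_by (md - d).toNat
decreasing_by
  rename_i h
  have _h2 : ¬ md ≤ d := (not_or.mp h).2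
  omega

def compute_reachability_alt (adjacency : List (String × List (List (String × Option String)))) (start_func : String) (max_depth : Int) : List (String × Int) :=
  (pvExpand (pvSuccs adjacency) max_depth ((PySem.Dict.empty).insert start_func 0) [start_func] 0).items

-- ===== PRECONDITION & SPEC =====
def Spec_compute_reachability (adjacency : List (String × List (List (String × Option String)))) (start_func : String) (max_depth : Int) (out : List (String × Int)) : Prop := out = compute_reachability_alt adjacency start_func max_depth
instance (adjacency : List (String × List (List (String × Option String)))) (start_func : String) (max_depth : Int) (out : List (String × Int)) : Decidable (Spec_compute_reachability adjacency start_func max_depth out) := by unfold Spec_compute_reachability; infer_instance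

-- ===== CLAIM (what is proved, stated in full; the proofs are below) =====
def Claim_equal_compute_reachability : Prop := ∀ (adjacency : List (String × List (List (String × Option String)))) (start_func : String) (max_depth : Int), Dom_compute_reachability adjacency start_func max_depth → Spec_compute_reachability adjacency start_func max_depth (compute_reachability adjacency start_func max_depth)

-- ===== LEMMAS AND PROOFS =====

-- Proof-side intermediate: A's per-xref step with a bare-names accumulator.
def pvStepB (adj : PySem.Dict String (List (List (String × Option String)))) (d : Int)
    (s : PySem.Dict String Int × List String) (xr : List (String × Option String)) :
    PySem.Dict String Int × List String :=
  let xd := PySem.Dict.ofList xr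
  match xd.getD "function_name" (some "") with
  | none => s
  | some c =>
    if c = "" ∨ s.1.contains c then s
    else if (xd.getD "function_id" none).isSome ∧ adj.contains c then
      (s.1.insert c (d + 1), s.2 ++ [c])
    else s

-- one frontier node, expanded over the RAW xrefs (proof-side)
def pvLevelNode (adj : PySem.Dict String (List (List (String × Option String)))) (d : Int)
    (s : PySem.Dict String Int × List String) (cur : String) :
    PySem.Dict String Int × List String :=
  (adj.getD cur []).foldl (pvStepB adj d) s

-- proof-side level-synchronous loop over the RAW graph
def pvLoopB (adj : PySem.Dict String (List (List (String × Option String)))) (md : Int)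
    (v : PySem.Dict String Int) (frontier : List String) (d : Int) : PySem.Dict String Int :=
  if frontier = [] ∨ md ≤ d then v
  else
    let s := frontier.foldl (pvLevelNode adj d) (v, [])
    pvLoopB adj md s.1 s.2 (d + 1)
termination_by (md - d).toNat
decreasing_by
  rename_i h
  have _h2 : ¬ md ≤ d := (not_or.mp h).2
  omega

-- A's step on a queue with an inert prefix q is the names-step with pairs (·, d+1) appended after q
theorem pvStep_shift (adj : PySem.Dict String (List (List (String × Option String)))) (d : Int)
    (q : List (String × Int)) (v : PySem.Dict String Int) (names : List String)
    (xr : List (String × Option String)) :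
    pvStepA adj d (v, q ++ names.map (fun c => (c, d + 1))) xr
      = ((pvStepB adj d (v, names) xr).1,
         q ++ (pvStepB adj d (v, names) xr).2.map (fun c => (c, d + 1))) := by
  unfold pvStepA pvStepB
  cases h : (PySem.Dict.ofList xr).getD "function_name" (some "") with
  | none => simp [h]
  | some c =>
    simp only [h]
    split_ifs with h1 h2 <;> simp

theorem pvFold_shift (adj : PySem.Dict String (List (List (String × Option String)))) (d : Int)
    (q : List (String × Int)) (xrs : List (List (String × Option String))) :
    ∀ (v : PySem.Dict String Int) (names : List String),
      xrs.foldl (pvStepA adj d) (v, q ++ names.map (fun c => (c, d + 1)))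
        = ((xrs.foldl (pvStepB adj d) (v, names)).1,
           q ++ (xrs.foldl (pvStepB adj d) (v, names)).2.map (fun c => (c, d + 1))) := by
  induction xrs with
  | nil => intro v names; rfl
  | cons xr xrs ih =>
    intro v names
    simp only [List.foldl_cons, pvStep_shift adj d q v names xr]
    have := ih (pvStepB adj d (v, names) xr).1 (pvStepB adj d (v, names) xr).2
    simpa using this

-- every queued entry at depth ≥ max_depth is drained without effect
theorem pvLoopA_drain (adj : PySem.Dict String (List (List (String × Option String)))) (md : Int) :
    ∀ (l : List (String × Int)) (v : PySem.Dict String Int),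
      (∀ p ∈ l, md ≤ p.2) → pvLoopA adj md v l = v := by
  intro l
  induction l with
  | nil => intro v _; simp [pvLoopA]
  | cons p rest ih =>
    intro v h
    obtain ⟨cur, dep⟩ := p
    rw [pvLoopA]
    simp only [h (cur, dep) (List.mem_cons_self), if_pos]
    exact ih v (fun p hp => h p (List.mem_cons_of_mem _ hp))

-- KEY 1: A's queue, viewed as a layer at depth d followed by a partial next layer at d+1,
-- computes exactly the level-synchronous loop over the raw graph.
theorem pvKey (adj : PySem.Dict String (List (List (String × Option String)))) (md : Int) :
    ∀ (n : Nat) (l1 l2 : List String) (v : PySem.Dict String Int) (d : Int),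
      d < md →
      pvMeasure adj v (l1.map (fun c => (c, d)) ++ l2.map (fun c => (c, d + 1)))
        + (md - d).toNat ≤ n →
      pvLoopA adj md v (l1.map (fun c => (c, d)) ++ l2.map (fun c => (c, d + 1)))
        = pvLoopB adj md (l1.foldl (pvLevelNode adj d) (v, l2)).1
            (l1.foldl (pvLevelNode adj d) (v, l2)).2 (d + 1) := by
  intro n
  induction n with
  | zero => intro l1 l2 v d hd hn; exfalso; omega
  | succ n ih =>
    intro l1 l2 v d hd hn
    cases l1 with
    | cons c l1' =>
      simp only [List.map_cons, List.cons_append]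
      rw [pvLoopA]
      simp only [not_le.mpr hd, if_false]
      have hshift := pvFold_shift adj d (l1'.map (fun c => (c, d))) (adj.getD c []) v l2
      rw [hshift]
      set u := (adj.getD c []).foldl (pvStepB adj d) (v, l2) with hu
      have hstep : (c :: l1').foldl (pvLevelNode adj d) (v, l2)
          = l1'.foldl (pvLevelNode adj d) u := by
        simp only [List.foldl_cons]; rfl
      rw [hstep]
      apply ih l1' u.2 u.1 d hd
      have hm := pvFoldA_measure adj d (adj.getD c []) (v, l1'.map (fun c => (c, d)) ++ l2.map (fun c => (c, d + 1)))
      rw [hshift] at hm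
      simp only [pvMeasure, List.length_append, List.length_map, List.length_cons] at hm hn ⊢
      omega
    | nil =>
      simp only [List.map_nil, List.nil_append, List.foldl_nil]
      by_cases h2 : l2 = []
      · subst h2
        simp only [List.map_nil]
        rw [pvLoopA, pvLoopB]
        simp
      · by_cases hmd : md ≤ d + 1
        · rw [pvLoopB]
          simp only [if_pos (Or.inr hmd)]
          apply pvLoopA_drain
          intro p hp
          simp only [List.mem_map] at hp
          obtain ⟨c, _, rfl⟩ := hp
          exact hmd
        · rw [not_le] at hmd
          rw [pvLoopB]
          simp only [h2, not_le.mpr hmd, or_self, if_false]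
          have := ih l2 [] v (d + 1) hmd (by
            simp only [pvMeasure, List.map_nil, List.append_nil, List.length_append,
              List.length_map, List.length_nil] at hn ⊢
            omega)
          simp only [List.map_nil, List.append_nil] at this
          rw [this]

-- KEY 2a: the raw per-xref step is the cleaned per-callee step
theorem pvStepB_eq_visit (adj : PySem.Dict String (List (List (String × Option String))))
    (d : Int) (s : PySem.Dict String Int × List String) (xr : List (String × Option String)) :
    pvStepB adj d s xr
      = if pvKeep adj xr then pvVisit d s ((pvName xr).getD "") else s := by
  unfold pvStepB pvKeep pvVisit pvName
  cases h : (PySem.Dict.ofList xr).getD "function_name" (some "") with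
  | none => simp [h]
  | some c =>
    simp only [h, Option.getD_some]
    by_cases hc : c = ""
    · simp [hc]
    · by_cases hfid : ((PySem.Dict.ofList xr).getD "function_id" none).isSome
      · by_cases hadj : adj.contains c
        · simp only [hc, hfid, hadj, and_true, if_true]
          by_cases hv : s.1.contains c <;> simp [hv, hc]
        · simp [hc, hfid, hadj]
      · simp [hc, hfid]

-- KEY 2b: folding the raw xrefs equals folding the cleaned callee list
theorem pvFold_clean (adj : PySem.Dict String (List (List (String × Option String)))) (d : Int)
    (xrs : List (List (String × Option String))) :
    ∀ s, xrs.foldl (pvStepB adj d) s = (pvClean adj xrs).foldl (pvVisit d) s := by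
  induction xrs with
  | nil => intro s; rfl
  | cons xr xrs ih =>
    intro s
    simp only [List.foldl_cons, pvStepB_eq_visit]
    by_cases hk : pvKeep adj xr
    · simp only [hk, if_true, pvClean, List.filter_cons_of_pos hk, List.map_cons,
        List.foldl_cons]
      exact ih _
    · simp only [hk, pvClean,
        List.filter_cons_of_neg (by simpa using hk)]
      exact ih s

-- getD of the dict-comprehension fold: untouched keys fall through
theorem pvSuccs_fold_not_mem {ν : Type} (f : List (List (String × Option String)) → ν) (dflt : ν) :
    ∀ (l : List (String × List (List (String × Option String)))) (d0 : PySem.Dict String ν)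
      (u : String), u ∉ l.map Prod.fst →
      (l.foldl (fun d p => d.insert p.1 (f p.2)) d0).getD u dflt = d0.getD u dflt := by
  intro l
  induction l with
  | nil => intro d0 u _; rfl
  | cons p l ih =>
    intro d0 u hu
    simp only [List.map_cons, List.mem_cons, not_or] at hu
    simp only [List.foldl_cons]
    rw [ih _ u hu.2, PySem.Dict.getD_insert_of_ne d0 _ _ hu.1]

-- getD of the dict-comprehension fold: a key present once gets f of its value
theorem pvSuccs_fold_mem {ν : Type} (f : List (List (String × Option String)) → ν) (dflt : ν) :
    ∀ (l : List (String × List (List (String × Option String)))) (d0 : PySem.Dict String ν)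
      (u : String) (xs : List (List (String × Option String))),
      (l.map Prod.fst).Nodup → (u, xs) ∈ l →
      (l.foldl (fun d p => d.insert p.1 (f p.2)) d0).getD u dflt = f xs := by
  intro l
  induction l with
  | nil => intro _ _ _ _ hm; cases hm
  | cons p l ih =>
    intro d0 u xs hnd hm
    simp only [List.map_cons, List.nodup_cons] at hnd
    simp only [List.foldl_cons]
    rcases List.mem_cons.mp hm with heq | hm'
    · subst heq
      have hu : u ∉ l.map Prod.fst := by simpa using hnd.1
      rw [pvSuccs_fold_not_mem f dflt l _ u hu, PySem.Dict.getD_insert_self]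
    · exact ih _ u xs hnd.2 hm'

-- the cleaned graph looks up exactly pvClean of the raw adjacency row
theorem pvSuccs_getD (adjacency : List (String × List (List (String × Option String))))
    (u : String) :
    (pvSuccs adjacency).getD u []
      = pvClean (PySem.Dict.ofList adjacency) ((PySem.Dict.ofList adjacency).getD u []) := by
  unfold pvSuccs
  set adj := PySem.Dict.ofList adjacency with hadj
  by_cases hc : adj.contains u
  · have hg : (adj.get? u).isSome := by
      rw [← PySem.Dict.contains_eq_isSome_get? adj u]; exact hc
    obtain ⟨v, hv⟩ := Option.isSome_iff_exists.mp hg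
    have hitems : (u, v) ∈ adj.items := PySem.Dict.mem_items_of_get?_eq_some adj hv
    have hnd : (adj.items.map Prod.fst).Nodup := by
      have := PySem.Dict.nodup_keys_ofList (κ := String)
        (ν := List (List (String × Option String))) adjacency
      simpa [PySem.Dict.keys, hadj] using this
    rw [pvSuccs_fold_mem _ _ adj.items _ u v hnd hitems,
        PySem.Dict.getD_of_get?_eq_some adj _ hv]
  · have hu : u ∉ adj.items.map Prod.fst := by
      intro hm
      have : u ∈ adj.keys := by simpa [PySem.Dict.keys] using hm
      exact absurd ((PySem.Dict.contains_iff_mem_keys adj u).mpr this) (by simp [hc])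
    rw [pvSuccs_fold_not_mem _ _ adj.items _ u hu,
        PySem.Dict.getD_of_not_contains adj _ (by simpa using hc), PySem.Dict.getD_empty]
    rfl

-- KEY 2: the proof-side raw-graph level loop IS B's expand over the cleaned graph
theorem pvLoopB_eq_expand (adjacency : List (String × List (List (String × Option String))))
    (md : Int) :
    ∀ (n : Nat) (v : PySem.Dict String Int) (fr : List String) (d : Int),
      (md - d).toNat ≤ n →
      pvLoopB (PySem.Dict.ofList adjacency) md v fr d = pvExpand (pvSuccs adjacency) md v fr d := by
  intro n
  induction n with
  | zero =>
    intro v fr d hn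
    have hmd : md ≤ d := by omega
    rw [pvLoopB, pvExpand]
    simp [hmd]
  | succ n ih =>
    intro v fr d hn
    rw [pvLoopB, pvExpand]
    by_cases hstop : fr = [] ∨ md ≤ d
    · simp [hstop]
    · simp only [hstop, if_false]
      have hfold : fr.foldl (pvLevelNode (PySem.Dict.ofList adjacency) d) (v, [])
          = fr.foldl (fun s u => ((pvSuccs adjacency).getD u []).foldl (pvVisit d) s) (v, []) := by
        apply PySem.List.foldl_congr_mem
        intro s u _
        rw [pvSuccs_getD]
        exact pvFold_clean _ d _ s
      rw [hfold]
      apply ih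
      have : ¬ md ≤ d := (not_or.mp hstop).2
      omega

-- ===== VERDICT (by name: the statement is the Claim_ definition above) =====
theorem compute_reachability_spec : Claim_equal_compute_reachability := by
  intro adjacency start_func max_depth _
  unfold Spec_compute_reachability compute_reachability compute_reachability_alt
  simp only
  set adj := PySem.Dict.ofList adjacency
  set v0 : PySem.Dict String Int := (PySem.Dict.empty).insert start_func 0
  congr 1
  have hB : ∀ v fr d, pvLoopB adj max_depth v fr d = pvExpand (pvSuccs adjacency) max_depth v fr d :=
    fun v fr d => pvLoopB_eq_expand adjacency max_depth (max_depth - d).toNat v fr d le_rfl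
  by_cases hmd : max_depth ≤ 0
  · rw [pvLoopA, ← hB, pvLoopB]
    simp only [if_pos hmd, if_pos (Or.inr hmd)]
    rw [pvLoopA]
  · rw [not_le] at hmd
    have hkey := pvKey adj max_depth
      (pvMeasure adj v0 [(start_func, 0)] + (max_depth - 0).toNat)
      [start_func] [] v0 0 hmd (by simp)
    simp only [List.map_cons, List.map_nil, List.append_nil, List.foldl_cons, List.foldl_nil]
      at hkey
    rw [hkey, ← hB]
    conv_rhs => rw [pvLoopB]
    have hne : ¬([start_func] = [] ∨ max_depth ≤ 0) := by
      rintro (h | h)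
      · simp at h
      · omega
    rw [if_neg hne]
    rfl
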